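-- pv_equiv track=rewrite | github.com/lixiang2017/leetcode | leetcode-cn/0468.0_Validate_IP_Address.py | isValid0to255
-- ===== SOURCE A (Python) =====
-- def isValid0to255(part) -> bool:
--     # leading zero
--     if (len(part) > 1 and part[0] == '0') or len(part) < 1 or len(part) > 3:
--         return False
--     x = 0
--     for p in part:
--         if not '0' <= p <= '9':
--             return False
--         x *= 10
--         x += ord(p) - ord('0')
--     return 0 <= x <= 255
-- ===== SOURCE B (Python) =====
-- def isValid0to255(part) -> bool:
--     # membership in the enumerated set of all canonical octet strings
--     return part in {str(i) for i in range(256)}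
-- ===== Notes on version B (the rewrite author's own statement) =====
-- stated objective: idiomatic
-- what changed: Replaces A's length checks, per-character digit loop and value accumulation with a single membership test against the enumerated set {str(i) for i in range(256)} of exactly the accepted strings.
import Mathlib
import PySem

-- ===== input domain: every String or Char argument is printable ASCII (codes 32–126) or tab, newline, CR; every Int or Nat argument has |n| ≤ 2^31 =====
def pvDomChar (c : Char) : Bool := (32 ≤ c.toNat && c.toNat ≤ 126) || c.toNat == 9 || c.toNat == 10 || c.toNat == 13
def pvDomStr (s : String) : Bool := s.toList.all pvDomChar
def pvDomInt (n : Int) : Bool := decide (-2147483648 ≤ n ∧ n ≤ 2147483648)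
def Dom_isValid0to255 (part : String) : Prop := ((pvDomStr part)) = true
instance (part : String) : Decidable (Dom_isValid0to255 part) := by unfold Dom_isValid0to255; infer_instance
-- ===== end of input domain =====

-- B replaces A's length checks, per-character digit loop and value accumulation with one
-- membership test against the enumerated set of all 256 canonical octet strings (idiomatic; no speed claim).

-- ===== PORT A =====
-- the 'for p in part' loop with its early 'return False' and accumulator x
def pvLoopA : List Char → Int → Bool
  | [], x => decide (0 ≤ x ∧ x ≤ 255)
  | p :: ps, x =>
    if ¬('0' ≤ p ∧ p ≤ '9') then false
    else pvLoopA ps (x * 10 + ((p.toNat : Int) - 48))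

def isValid0to255 (part : String) : Bool :=
  let cs := part.toList
  -- part[0] is only read under 'len(part) > 1', so headD is exact here
  if (decide (1 < cs.length) && (cs.headD default == '0'))
      || decide (cs.length < 1) || decide (3 < cs.length) then false
  else pvLoopA cs 0

-- ===== PORT B =====
-- part in {str(i) for i in range(256)}
def isValid0to255_alt (part : String) : Bool :=
  ((PySem.List.pyRange 0 256 1).map PySem.Int.toStr).contains part

-- ===== PRECONDITION & SPEC =====
def Spec_isValid0to255 (part : String) (out : Bool) : Prop := out = isValid0to255_alt part
instance (part : String) (out : Bool) : Decidable (Spec_isValid0to255 part out) := by unfold Spec_isValid0to255; infer_instance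

-- ===== CLAIM (what is proved, stated in full; the proofs are below) =====
def Claim_equal_isValid0to255 : Prop := ∀ (part : String), Dom_isValid0to255 part → Spec_isValid0to255 part (isValid0to255 part)

-- ===== LEMMAS AND PROOFS =====

-- every string in B's set is accepted by A
set_option maxRecDepth 4096 in
lemma pv_allA : ((PySem.List.pyRange 0 256 1).map PySem.Int.toStr).all isValid0to255 = true := by
  decide

-- a digit char is Char.ofNat (48 + d) for some d < 10
lemma pv_digit_char (p : Char) (h1 : '0' ≤ p) (h2 : p ≤ '9') :
    ∃ d, d < 10 ∧ p = Char.ofNat (48 + d) := by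
  have hv1 : 48 ≤ p.toNat := by simpa [Char.le_def, UInt32.le_iff_toNat_le] using h1
  have hv2 : p.toNat ≤ 57 := by simpa [Char.le_def, UInt32.le_iff_toNat_le] using h2
  refine ⟨p.toNat - 48, by omega, ?_⟩
  have h : 48 + (p.toNat - 48) = p.toNat := by omega
  rw [h]
  exact (Char.ofNat_toNat p).symm

set_option maxRecDepth 4096 in
lemma pv_mem1 (a : Nat) (ha : a < 10) :
    isValid0to255_alt (String.ofList [Char.ofNat (48 + a)]) = true := by
  have h : ((List.range 10).all fun a =>
      isValid0to255_alt (String.ofList [Char.ofNat (48 + a)])) = true := by decide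
  exact List.all_eq_true.mp h a (List.mem_range.mpr ha)

set_option maxRecDepth 4096 in
lemma pv_mem2 (a b : Nat) (ha1 : 1 ≤ a) (ha : a < 10) (hb : b < 10) :
    isValid0to255_alt (String.ofList [Char.ofNat (48 + a), Char.ofNat (48 + b)]) = true := by
  have h : ((List.range 10).all fun a => (List.range 10).all fun b =>
      !decide (1 ≤ a) ||
        isValid0to255_alt (String.ofList [Char.ofNat (48 + a), Char.ofNat (48 + b)])) = true := by
    decide
  have h2 := List.all_eq_true.mp
    (List.all_eq_true.mp h a (List.mem_range.mpr ha)) b (List.mem_range.mpr hb)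
  simpa [ha1] using h2

set_option maxRecDepth 8192 in
lemma pv_mem3 (a b c : Nat) (ha1 : 1 ≤ a) (hb : b < 10) (hc : c < 10)
    (hv : 100 * a + 10 * b + c ≤ 255) :
    isValid0to255_alt
      (String.ofList [Char.ofNat (48 + a), Char.ofNat (48 + b), Char.ofNat (48 + c)]) = true := by
  have ha3 : a < 3 := by omega
  have h : ((List.range 3).all fun a => (List.range 10).all fun b => (List.range 10).all fun c =>
      !(decide (1 ≤ a) && decide (100 * a + 10 * b + c ≤ 255)) ||
        isValid0to255_alt
          (String.ofList [Char.ofNat (48 + a), Char.ofNat (48 + b), Char.ofNat (48 + c)])) = true := by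
    decide
  have h2 := List.all_eq_true.mp (List.all_eq_true.mp
    (List.all_eq_true.mp h a (List.mem_range.mpr ha3)) b (List.mem_range.mpr hb))
    c (List.mem_range.mpr hc)
  simpa [ha1, hv] using h2

-- if A accepts, the string is in B's set
lemma pv_alt_of_A (s : String) (hA : isValid0to255 s = true) : isValid0to255_alt s = true := by
  have hs : String.ofList s.toList = s := String.ofList_toList
  unfold isValid0to255 at hA
  rcases hcs : s.toList with _ | ⟨a, _ | ⟨b, _ | ⟨c, _ | ⟨d, t⟩⟩⟩⟩ <;> rw [hcs] at hA hs
  · simp at hA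
  · -- length 1
    simp only [pvLoopA] at hA
    simp at hA
    obtain ⟨⟨h1, h2⟩, -⟩ := hA
    obtain ⟨da, hda, rfl⟩ := pv_digit_char a h1 h2
    rw [← hs]; exact pv_mem1 da hda
  · -- length 2
    simp only [pvLoopA] at hA
    simp at hA
    obtain ⟨hne0, ⟨ha1, ha2⟩, ⟨hb1, hb2⟩, -⟩ := hA
    obtain ⟨da, hda, rfl⟩ := pv_digit_char a ha1 ha2
    obtain ⟨db, hdb, rfl⟩ := pv_digit_char b hb1 hb2
    have hda1 : 1 ≤ da := by
      rcases Nat.eq_zero_or_pos da with h | h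
      · subst h; exact absurd (by decide) hne0
      · exact h
    rw [← hs]; exact pv_mem2 da db hda1 hda hdb
  · -- length 3
    simp only [pvLoopA] at hA
    simp at hA
    obtain ⟨hne0, ⟨ha1, ha2⟩, ⟨hb1, hb2⟩, ⟨hc1, hc2⟩, hv⟩ := hA
    obtain ⟨da, hda, rfl⟩ := pv_digit_char a ha1 ha2
    obtain ⟨db, hdb, rfl⟩ := pv_digit_char b hb1 hb2
    obtain ⟨dc, hdc, rfl⟩ := pv_digit_char c hc1 hc2
    have hta : (Char.ofNat (48 + da)).toNat = 48 + da := by interval_cases da <;> decide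
    have htb : (Char.ofNat (48 + db)).toNat = 48 + db := by interval_cases db <;> decide
    have htc : (Char.ofNat (48 + dc)).toNat = 48 + dc := by interval_cases dc <;> decide
    rw [hta, htb, htc] at hv
    have hv' : 100 * da + 10 * db + dc ≤ 255 := by push_cast at hv; omega
    have hda1 : 1 ≤ da := by
      rcases Nat.eq_zero_or_pos da with h | h
      · subst h; exact absurd (by decide) hne0
      · exact h
    rw [← hs]; exact pv_mem3 da db dc hda1 hdb hdc hv'
  · -- length ≥ 4
    simp at hA

lemma pv_A_of_alt (s : String) (hB : isValid0to255_alt s = true) : isValid0to255 s = true := by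
  unfold isValid0to255_alt at hB
  exact List.all_eq_true.mp pv_allA s (List.contains_iff_mem.mp hB)

-- ===== VERDICT (by name: the statement is the Claim_ definition above) =====
theorem isValid0to255_spec : Claim_equal_isValid0to255 := by
  intro part _
  unfold Spec_isValid0to255
  cases hB : isValid0to255_alt part with
  | true => exact pv_A_of_alt part hB
  | false =>
    cases hA : isValid0to255 part with
    | true => rw [pv_alt_of_A part hA] at hB; exact absurd hB (by decide)
    | false => rfl
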